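-- pv_equiv track=rewrite | github.com/idocx/ValenceSolver | ValenceSolver/core/utils.py | merge_valence_as_one
-- ===== SOURCE A (Python) =====
-- def merge_valence_as_one(valence_combos):
--     valence_all_ele = {}
--     could_merge = True
--     for combo in valence_combos:
--         for ele in combo['valence']:
--             if ele not in valence_all_ele:
--                 valence_all_ele[ele] = []
--             valence_all_ele[ele].append(combo['valence'][ele])
--     for ele in valence_all_ele:
--         if len(set(valence_all_ele[ele])) == 1:
--             valence_all_ele[ele] = valence_all_ele[ele][0]
--         else:
--             could_merge = False
--             break
--     if not len(valence_all_ele):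
--         could_merge = False
--     if not could_merge:
--         valence_all_ele = None
--     return could_merge, valence_all_ele
-- ===== SOURCE B (Python) =====
-- def merge_valence_as_one(valence_combos):
--     merged = {}
--     could_merge = True
--     for combo in valence_combos:
--         for ele, val in combo['valence'].items():
--             if ele in merged:
--                 if merged[ele] != val:
--                     could_merge = False
--             else:
--                 merged[ele] = val
--     if not merged or not could_merge:
--         return False, None
--     return True, merged
-- ===== Notes on version B (the rewrite author's own statement) =====
-- stated objective: simpler
-- what changed: Replaces the two-phase algorithm (group all values into per-element lists, then validate each list with set() in a second loop) by one fused pass that keeps only the first-seen value per element and a conflict flag, so no intermediate lists/sets and no second loop.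
import Mathlib
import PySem

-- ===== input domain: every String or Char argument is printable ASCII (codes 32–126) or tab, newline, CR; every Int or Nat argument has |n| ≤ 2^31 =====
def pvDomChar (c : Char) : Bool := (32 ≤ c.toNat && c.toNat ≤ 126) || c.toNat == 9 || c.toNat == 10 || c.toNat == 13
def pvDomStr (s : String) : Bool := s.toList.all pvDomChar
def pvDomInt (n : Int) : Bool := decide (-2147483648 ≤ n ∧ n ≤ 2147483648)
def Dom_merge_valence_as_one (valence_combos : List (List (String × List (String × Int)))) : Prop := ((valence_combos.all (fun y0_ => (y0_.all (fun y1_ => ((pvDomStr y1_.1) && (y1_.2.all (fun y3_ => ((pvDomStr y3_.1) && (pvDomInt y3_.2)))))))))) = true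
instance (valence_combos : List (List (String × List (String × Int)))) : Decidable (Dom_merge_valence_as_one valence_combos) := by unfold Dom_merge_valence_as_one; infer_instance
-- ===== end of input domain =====

-- B replaces A's two-phase algorithm (group every value into a per-element list, then a second
-- set()-based validation loop with break) by one fused pass keeping the first-seen value per
-- element and a conflict flag (objective: simpler; no speed claim).

-- ===== PORT A =====
-- A's second loop, with its `break`: walks the keys, converting each singleton-valued
-- value-list to its first element; stops with could_merge = False at the first non-singleton
def mvCheckA (d : PySem.Dict String (List Int)) : List String → List (String × Int) → Bool × List (String × Int)
  | [], acc => (true, acc)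
  | ele :: rest, acc =>
    let vs := d.getD ele []
    if (PySem.Set.ofList vs).length == 1 then
      -- valence_all_ele[ele][0]: the list is nonempty for every present key, so index 0 never raises
      mvCheckA d rest (acc ++ [(ele, PySem.List.pyGetD vs 0 0)])
    else (false, acc)

def merge_valence_as_one (valence_combos : List (List (String × List (String × Int)))) : Bool × (Option (List (String × Int))) :=
  -- first loop: valence_all_ele[ele].append(combo['valence'][ele]); combo['valence'] raises
  -- KeyError when the key is missing — those inputs are excluded by Pre_, so getD [] below is unreachable there
  let valence_all_ele : PySem.Dict String (List Int) :=
    valence_combos.foldl (fun d combo =>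
      let vd : PySem.Dict String Int := PySem.Dict.mk ((PySem.Dict.mk combo).getD "valence" [])
      (PySem.Set.ofList vd.keys).foldl (fun d ele => d.modify ele [] (fun l => l ++ [vd.getD ele 0])) d)
      PySem.Dict.empty
  let r := mvCheckA valence_all_ele valence_all_ele.keys []
  let could_merge := r.1 && !(valence_all_ele.size == 0)
  if could_merge then (true, some r.2) else (false, none)

-- ===== PORT B =====
def merge_valence_as_one_alt (valence_combos : List (List (String × List (String × Int)))) : Bool × (Option (List (String × Int))) :=
  let s : PySem.Dict String Int × Bool :=
    valence_combos.foldl (fun s combo =>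
      let vd : PySem.Dict String Int := PySem.Dict.mk ((PySem.Dict.mk combo).getD "valence" [])
      (PySem.Set.ofList vd.keys).foldl (fun s ele =>
        let v := vd.getD ele 0
        match s.1.get? ele with
        | some w => (s.1, if w == v then s.2 else false)
        | none => (s.1.insert ele v, s.2)) s)
      (PySem.Dict.empty, true)
  if s.1.size == 0 || !s.2 then (false, none) else (true, some s.1.items)

-- ===== PRECONDITION & SPEC =====
-- Pre_ excludes exactly the inputs where combo['valence'] raises KeyError in A (a combo without the key "valence")
def Pre_merge_valence_as_one (valence_combos : List (List (String × List (String × Int)))) : Prop :=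
  ∀ combo ∈ valence_combos, "valence" ∈ combo.map Prod.fst
instance (valence_combos : List (List (String × List (String × Int)))) : Decidable (Pre_merge_valence_as_one valence_combos) := by unfold Pre_merge_valence_as_one; infer_instance
def pvWitness_merge_valence_as_one : (List (List (String × List (String × Int)))) := [[("valence", [("Fe", 2)])]]
def Spec_merge_valence_as_one (valence_combos : List (List (String × List (String × Int)))) (out : Bool × (Option (List (String × Int)))) : Prop := out = merge_valence_as_one_alt valence_combos
instance (valence_combos : List (List (String × List (String × Int)))) (out : Bool × (Option (List (String × Int)))) : Decidable (Spec_merge_valence_as_one valence_combos out) := by unfold Spec_merge_valence_as_one; infer_instance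

-- ===== CLAIM (what is proved, stated in full; the proofs are below) =====
def Claim_equal_merge_valence_as_one : Prop := ∀ (valence_combos : List (List (String × List (String × Int)))), Dom_merge_valence_as_one valence_combos → Pre_merge_valence_as_one valence_combos → Spec_merge_valence_as_one valence_combos (merge_valence_as_one valence_combos)

-- ===== LEMMAS AND PROOFS =====

-- the per-combo stream of (element, value) pairs both ports traverse
def mvPairs (combo : List (String × List (String × Int))) : List (String × Int) :=
  let vd : PySem.Dict String Int := PySem.Dict.mk ((PySem.Dict.mk combo).getD "valence" [])
  (PySem.Set.ofList vd.keys).map (fun e => (e, vd.getD e 0))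

def mvStepA (d : PySem.Dict String (List Int)) (p : String × Int) : PySem.Dict String (List Int) :=
  d.modify p.1 [] (fun l => l ++ [p.2])

def mvStepB (s : PySem.Dict String Int × Bool) (p : String × Int) : PySem.Dict String Int × Bool :=
  match s.1.get? p.1 with
  | some w => (s.1, if w == p.2 then s.2 else false)
  | none => (s.1.insert p.1 p.2, s.2)

def mvVals (ps : List (String × Int)) (k : String) : List Int :=
  (ps.filter (fun p => p.1 == k)).map (fun p => p.2)

def mvKeys (ps : List (String × Int)) : List String := PySem.Set.ofList (ps.map (fun p => p.1))

def mvFirst (ps : List (String × Int)) (k : String) : Int := (mvVals ps k).headD 0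

theorem portA_flat (vcs : List (List (String × List (String × Int)))) :
    merge_valence_as_one vcs =
      (let d := (vcs.flatMap mvPairs).foldl mvStepA PySem.Dict.empty
       let r := mvCheckA d d.keys []
       if r.1 && !(d.size == 0) then (true, some r.2) else (false, none)) := by
  rw [merge_valence_as_one]
  have hf : (fun (d : PySem.Dict String (List Int)) (combo : List (String × List (String × Int))) =>
        let vd : PySem.Dict String Int := PySem.Dict.mk ((PySem.Dict.mk combo).getD "valence" [])
        (PySem.Set.ofList vd.keys).foldl (fun d ele => d.modify ele [] (fun l => l ++ [vd.getD ele 0])) d) =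
      (fun d combo => (mvPairs combo).foldl mvStepA d) := by
    funext d combo
    rw [mvPairs, List.foldl_map]
    rfl
  rw [hf, ← List.foldl_flatMap]

theorem portB_flat (vcs : List (List (String × List (String × Int)))) :
    merge_valence_as_one_alt vcs =
      (let s := (vcs.flatMap mvPairs).foldl mvStepB (PySem.Dict.empty, true)
       if s.1.size == 0 || !s.2 then (false, none) else (true, some s.1.items)) := by
  rw [merge_valence_as_one_alt]
  have hf : (fun (s : PySem.Dict String Int × Bool) (combo : List (String × List (String × Int))) =>
        let vd : PySem.Dict String Int := PySem.Dict.mk ((PySem.Dict.mk combo).getD "valence" [])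
        (PySem.Set.ofList vd.keys).foldl (fun s ele =>
          let v := vd.getD ele 0
          match s.1.get? ele with
          | some w => (s.1, if w == v then s.2 else false)
          | none => (s.1.insert ele v, s.2)) s) =
      (fun s combo => (mvPairs combo).foldl mvStepB s) := by
    funext s combo
    rw [mvPairs, List.foldl_map]
    rfl
  rw [hf, ← List.foldl_flatMap]

theorem get?_mk_map (L : List String) (f : String → Int) (x : String) :
    (PySem.Dict.mk (L.map (fun k => (k, f k)))).get? x = if x ∈ L then some (f x) else none := by
  induction L with
  | nil => simp [PySem.Dict.get?]
  | cons a t ih =>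
    simp only [List.map_cons, PySem.Dict.get?_mk_cons, ih, List.mem_cons, beq_iff_eq]
    by_cases h : a = x
    · subst h; simp
    · simp [h, Ne.symm h]

theorem all_congr_mem {α : Type} (l : List α) (f g : α → Bool) (h : ∀ x ∈ l, f x = g x) :
    l.all f = l.all g := by
  induction l with
  | nil => rfl
  | cons a t ih => simp only [List.all_cons, h a (by simp)]; rw [ih (fun x hx => h x (by simp [hx]))]

theorem mvKeys_append (ps : List (String × Int)) (p : String × Int) :
    mvKeys (ps ++ [p]) = if p.1 ∈ mvKeys ps then mvKeys ps else mvKeys ps ++ [p.1] := by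
  simp only [mvKeys, PySem.Set.ofList_eq_foldl, List.map_append, List.foldl_append, List.map_cons,
    List.map_nil, List.foldl_cons, List.foldl_nil]
  rw [PySem.Set.add, PySem.Set.contains]
  by_cases hm : p.1 ∈ List.foldl PySem.Set.add [] (List.map (fun p => p.1) ps) <;>
    simp [hm]

theorem mvVals_append (ps : List (String × Int)) (p : String × Int) (k : String) :
    mvVals (ps ++ [p]) k = mvVals ps k ++ (if p.1 = k then [p.2] else []) := by
  simp only [mvVals, List.filter_append, List.map_append]
  by_cases h : p.1 = k
  · simp [List.filter, h]
  · simp [beq_eq_false_iff_ne.mpr h, h]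

theorem mvVals_ne_nil (ps : List (String × Int)) (k : String) (h : k ∈ mvKeys ps) :
    mvVals ps k ≠ [] := by
  rw [mvKeys, PySem.Set.mem_ofList, List.mem_map] at h
  obtain ⟨q, hq, rfl⟩ := h
  simp only [mvVals, ne_eq, List.map_eq_nil_iff, List.filter_eq_nil_iff]
  intro hc; exact hc q hq (by simp)

theorem mvVals_nil_of_not_mem (ps : List (String × Int)) (k : String) (h : k ∉ mvKeys ps) :
    mvVals ps k = [] := by
  rw [mvKeys, PySem.Set.mem_ofList] at h
  simp only [mvVals, List.map_eq_nil_iff, List.filter_eq_nil_iff, beq_iff_eq]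
  intro q hq hqk
  exact h (List.mem_map.mpr ⟨q, hq, hqk⟩)

theorem mvFirst_append (ps : List (String × Int)) (p : String × Int) (k : String) (hk : k ∈ mvKeys ps) :
    mvFirst (ps ++ [p]) k = mvFirst ps k := by
  have h := mvVals_ne_nil ps k hk
  rw [mvFirst, mvFirst, mvVals_append]
  cases hv : mvVals ps k with
  | nil => exact absurd hv h
  | cons a t => split <;> simp

theorem len_le_foldl_add (t : List Int) (s : PySem.Set Int) :
    s.length ≤ (t.foldl PySem.Set.add s).length := by
  induction t generalizing s with
  | nil => simp
  | cons x t ih =>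
    refine le_trans ?_ (ih (PySem.Set.add s x))
    rw [PySem.Set.add]; split <;> simp

theorem set_len_one (a : Int) (t : List Int) :
    ((PySem.Set.ofList (a :: t)).length == 1) = t.all (fun v => v == a) := by
  have key : ∀ (t : List Int), ((t.foldl PySem.Set.add [a]).length == 1) = t.all (fun v => v == a) := by
    intro t
    induction t with
    | nil => simp
    | cons x t ih =>
      by_cases h : x = a
      · subst h
        have hx : PySem.Set.add [x] x = [x] := by
          rw [PySem.Set.add, PySem.Set.contains]; simp
        simp only [List.foldl_cons, hx, List.all_cons]
        simp [ih]
      · have h2 : PySem.Set.add [a] x = [a, x] := by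
          rw [PySem.Set.add, PySem.Set.contains]
          simp [h]
        have h3 : 2 ≤ (t.foldl PySem.Set.add [a, x]).length := by
          simpa using len_le_foldl_add t [a, x]
        simp only [List.foldl_cons, h2, List.all_cons]
        have h4 : ((t.foldl PySem.Set.add [a, x]).length == 1) = false := by
          simp only [beq_eq_false_iff_ne, ne_eq]; omega
        simp [h4, h]
  rw [PySem.Set.ofList_eq_foldl, List.foldl_cons]
  have h0 : PySem.Set.add [] a = [a] := by
    rw [PySem.Set.add, PySem.Set.contains]; simp
  rw [h0, key]

theorem mvB_char (ps : List (String × Int)) :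
    ps.foldl mvStepB (PySem.Dict.empty, true) =
      (PySem.Dict.mk ((mvKeys ps).map (fun k => (k, mvFirst ps k))),
       (mvKeys ps).all (fun k => (mvVals ps k).all (fun v => v == mvFirst ps k))) := by
  induction ps using List.reverseRecOn with
  | nil => simp [mvKeys, mvVals, PySem.Set.ofList, PySem.Dict.empty]
  | append_singleton ps p ih =>
    rw [List.foldl_append, List.foldl_cons, List.foldl_nil, ih]
    by_cases hk : p.1 ∈ mvKeys ps
    · rw [mvStepB]
      simp only [get?_mk_map, hk, if_pos]
      have hdict : PySem.Dict.mk ((mvKeys ps).map (fun k => (k, mvFirst ps k))) =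
          PySem.Dict.mk ((mvKeys (ps ++ [p])).map (fun k => (k, mvFirst (ps ++ [p]) k))) := by
        rw [mvKeys_append, if_pos hk]
        exact congrArg _ (List.map_congr_left (fun k hkk => by
          rw [mvFirst_append ps p k hkk])).symm
      have hflag : (if (mvFirst ps p.1 == p.2) = true then
            (mvKeys ps).all (fun k => (mvVals ps k).all (fun v => v == mvFirst ps k)) else false) =
          (mvKeys (ps ++ [p])).all (fun k => (mvVals (ps ++ [p]) k).all (fun v => v == mvFirst (ps ++ [p]) k)) := by
        rw [mvKeys_append, if_pos hk, Bool.eq_iff_iff]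
        have hif : ∀ (c b : Bool), (if c = true then b else false) = (c && b) := by
          intro c b; cases c <;> simp
        rw [hif, Bool.and_eq_true]
        simp only [List.all_eq_true, beq_iff_eq]
        constructor
        · rintro ⟨h1, h2⟩ k hkm v hv
          rw [mvVals_append] at hv
          rw [mvFirst_append ps p k hkm]
          rcases List.mem_append.mp hv with hv | hv
          · exact h2 k hkm v hv
          · by_cases he : p.1 = k
            · rw [if_pos he] at hv
              simp only [List.mem_singleton] at hv
              subst hv; simp [← he, h1]
            · rw [if_neg he] at hv; simp at hv
        · intro hall
          refine ⟨?_, ?_⟩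
          · have := hall p.1 hk p.2 (by
              rw [mvVals_append, if_pos rfl]; exact List.mem_append.mpr (Or.inr (by simp)))
            rw [mvFirst_append ps p p.1 hk] at this
            exact this.symm
          · intro k hkm v hv
            have := hall k hkm v (by rw [mvVals_append]; exact List.mem_append.mpr (Or.inl hv))
            rwa [mvFirst_append ps p k hkm] at this
      rw [Prod.mk.injEq]; exact ⟨hdict, hflag⟩
    · rw [mvStepB]
      simp only [get?_mk_map, hk, if_false]
      have hvp : mvVals (ps ++ [p]) p.1 = [p.2] := by
        rw [mvVals_append, mvVals_nil_of_not_mem ps p.1 hk]; simp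
      have hfp : mvFirst (ps ++ [p]) p.1 = p.2 := by rw [mvFirst, hvp]; rfl
      have hdict : (PySem.Dict.mk ((mvKeys ps).map (fun k => (k, mvFirst ps k)))).insert p.1 p.2 =
          PySem.Dict.mk ((mvKeys (ps ++ [p])).map (fun k => (k, mvFirst (ps ++ [p]) k))) := by
        apply PySem.Dict.ext
        rw [PySem.Dict.items_insert_of_not_contains]
        · have hmap : (mvKeys ps).map (fun k => (k, mvFirst (ps ++ [p]) k)) =
              (mvKeys ps).map (fun k => (k, mvFirst ps k)) :=
            List.map_congr_left (fun k hkk => by rw [mvFirst_append ps p k hkk])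
          rw [mvKeys_append, if_neg hk, List.map_append, hmap]
          simp [hfp]
        · rw [PySem.Dict.contains_eq_isSome_get?, get?_mk_map, if_neg hk]; rfl
      have hflag : ((mvKeys ps).all (fun k => (mvVals ps k).all (fun v => v == mvFirst ps k))) =
          (mvKeys (ps ++ [p])).all (fun k => (mvVals (ps ++ [p]) k).all (fun v => v == mvFirst (ps ++ [p]) k)) := by
        rw [mvKeys_append, if_neg hk, List.all_append]
        have h1 : ([p.1].all fun k => (mvVals (ps ++ [p]) k).all (fun v => v == mvFirst (ps ++ [p]) k)) = true := by
          simp [hvp, hfp]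
        rw [h1, Bool.and_true]
        apply all_congr_mem
        intro k hkk
        rw [mvFirst_append ps p k hkk, mvVals_append]
        have : p.1 ≠ k := fun he => hk (he ▸ hkk)
        rw [if_neg this]; simp
      rw [Prod.mk.injEq]; exact ⟨hdict, hflag⟩

theorem mvCheckA_fst (d : PySem.Dict String (List Int)) (L : List String) (acc : List (String × Int)) :
    (mvCheckA d L acc).1 = L.all (fun k => (PySem.Set.ofList (d.getD k [])).length == 1) := by
  induction L generalizing acc with
  | nil => simp [mvCheckA]
  | cons a t ih =>
    rw [mvCheckA, List.all_cons]
    split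
    · rename_i h; rw [ih]; simp_all
    · rename_i h; simp_all

theorem mvCheckA_snd (d : PySem.Dict String (List Int)) (L : List String) (acc : List (String × Int))
    (h : ∀ k ∈ L, ((PySem.Set.ofList (d.getD k [])).length == 1) = true) :
    (mvCheckA d L acc).2 = acc ++ L.map (fun k => (k, PySem.List.pyGetD (d.getD k []) 0 0)) := by
  induction L generalizing acc with
  | nil => simp [mvCheckA]
  | cons a t ih =>
    rw [mvCheckA]
    split
    · rw [ih _ (fun k hk => h k (by simp [hk]))]; simp
    · rename_i hc; exact absurd (h a (by simp)) (by simpa using hc)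

theorem dA_getD (ps : List (String × Int)) (k : String) :
    (ps.foldl mvStepA PySem.Dict.empty).getD k [] = mvVals ps k := by
  have h0 : ps.foldl mvStepA PySem.Dict.empty =
      ps.foldl (fun (d : PySem.Dict String (List Int)) p => d.modify p.1 [] (fun x => x ++ [p.2]))
        PySem.Dict.empty := rfl
  rw [mvVals, h0, PySem.Dict.getD_foldl_modify_append, PySem.Dict.getD_empty, List.nil_append]

theorem dA_keys (ps : List (String × Int)) :
    (ps.foldl mvStepA PySem.Dict.empty).keys = mvKeys ps := by
  have h0 : ps.foldl mvStepA PySem.Dict.empty =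
      ps.foldl (fun (d : PySem.Dict String (List Int)) p => d.modify p.1 [] (fun x => x ++ [p.2]))
        PySem.Dict.empty := rfl
  rw [h0, PySem.Dict.keys_foldl_modify_key ps (fun p => p.1) ([] : List Int)
    (fun _ p => fun x => x ++ [p.2]) PySem.Dict.empty]
  rw [PySem.Dict.keys_empty, mvKeys, PySem.Set.ofList_eq_foldl]
  rfl

-- ===== VERDICT (by name: the statement is the Claim_ definition above) =====
theorem merge_valence_as_one_spec : Claim_equal_merge_valence_as_one := by
  intro vcs _ _
  rw [Spec_merge_valence_as_one, portA_flat, portB_flat, mvB_char]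
  set ps := vcs.flatMap mvPairs with hps
  set d := ps.foldl mvStepA PySem.Dict.empty with hd
  -- per-key facts
  have hgood : ∀ k ∈ mvKeys ps,
      ((PySem.Set.ofList (d.getD k [])).length == 1) =
        ((mvVals ps k).all (fun v => v == mvFirst ps k)) := by
    intro k hk
    rw [dA_getD]
    cases hv : mvVals ps k with
    | nil => exact absurd hv (mvVals_ne_nil ps k hk)
    | cons a t => rw [set_len_one, mvFirst, hv]; simp
  have hok : (mvCheckA d d.keys []).1 =
      (mvKeys ps).all (fun k => (mvVals ps k).all (fun v => v == mvFirst ps k)) := by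
    rw [mvCheckA_fst, dA_keys]
    exact all_congr_mem _ _ _ hgood
  have hsize : d.size = (mvKeys ps).length := by
    have h1 := congrArg List.length (dA_keys ps)
    simpa [PySem.Dict.keys, PySem.Dict.size] using h1
  by_cases hemp : mvKeys ps = []
  · have h1 : (d.size == 0) = true := by simp [hsize, hemp]
    have h2 : (((PySem.Dict.mk ((mvKeys ps).map (fun k => (k, mvFirst ps k)))).size) == 0) = true := by
      simp [PySem.Dict.size, hemp]
    simp [h1, h2]
  · have hsz : (d.size == 0) = false := by
      simp only [hsize, beq_eq_false_iff_ne, ne_eq, List.length_eq_zero_iff]; exact hemp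
    have hsz2 : (((PySem.Dict.mk ((mvKeys ps).map (fun k => (k, mvFirst ps k)))).size) == 0) = false := by
      simp only [PySem.Dict.size, beq_eq_false_iff_ne, ne_eq, List.length_eq_zero_iff,
        List.map_eq_nil_iff]
      exact hemp
    by_cases hokb : (mvKeys ps).all (fun k => (mvVals ps k).all (fun v => v == mvFirst ps k)) = true
    · have hsnd : (mvCheckA d d.keys []).2 = (mvKeys ps).map (fun k => (k, mvFirst ps k)) := by
        rw [dA_keys, mvCheckA_snd d _ [] (by
          intro k hk; rw [hgood k hk]; exact (List.all_eq_true.mp hokb) k hk)]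
        rw [List.nil_append]
        apply List.map_congr_left
        intro k hk
        rw [dA_getD]
        cases hv : mvVals ps k with
        | nil => exact absurd hv (mvVals_ne_nil ps k hk)
        | cons a t =>
          rw [mvFirst, hv]
          simp [PySem.List.pyGetD, PySem.List.pyGet?, PySem.List.pyIdx?]
      simp [hok, hokb, hsnd, hsz, hsz2]
    · have h1 : (mvCheckA d d.keys []).1 = false := by rw [hok]; simpa using hokb
      have h2 : ((mvKeys ps).all (fun k => (mvVals ps k).all (fun v => v == mvFirst ps k))) = false := by
        simpa using hokb
      simp [h1, h2, hsz2]
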